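-- pv_equiv track=rewrite | github.com/lustory/tools | track.py | get_object_label
-- ===== SOURCE A (Python) =====
-- def get_object_label(objects, rects):
--     '''
--         从跟踪的objects获取输入rect的label
--     '''
--     labels = []
--     for rect in rects:
--         for k, v in objects.items():
--             if rect in v:
--                 labels.append(k)
--                 break
--     return labels
-- ===== SOURCE B (Python) =====
-- def get_object_label(objects, rects):
--     '''
--         从跟踪的objects获取输入rect的label
--     '''
--     # Reverse index rect -> key, built by iterating objects in REVERSE order with
--     # plain overwriting inserts, so the FIRST key in dict order wins; then each
--     # query is one O(1) lookup (list comprehension).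
--     index = {}
--     for k, v in reversed(list(objects.items())):
--         for rect in v:
--             index[tuple(rect)] = k
--     return [index[t] for t in (tuple(r) for r in rects) if t in index]
-- ===== Notes on version B (the rewrite author's own statement) =====
-- stated objective: faster
-- what changed: Instead of scanning every object's list for every rect, B builds a reverse index rect->key once by iterating objects in reverse with overwriting inserts (so the first key in dict order wins) and answers each rect with one dictionary lookup via a comprehension.
import Mathlib
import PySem

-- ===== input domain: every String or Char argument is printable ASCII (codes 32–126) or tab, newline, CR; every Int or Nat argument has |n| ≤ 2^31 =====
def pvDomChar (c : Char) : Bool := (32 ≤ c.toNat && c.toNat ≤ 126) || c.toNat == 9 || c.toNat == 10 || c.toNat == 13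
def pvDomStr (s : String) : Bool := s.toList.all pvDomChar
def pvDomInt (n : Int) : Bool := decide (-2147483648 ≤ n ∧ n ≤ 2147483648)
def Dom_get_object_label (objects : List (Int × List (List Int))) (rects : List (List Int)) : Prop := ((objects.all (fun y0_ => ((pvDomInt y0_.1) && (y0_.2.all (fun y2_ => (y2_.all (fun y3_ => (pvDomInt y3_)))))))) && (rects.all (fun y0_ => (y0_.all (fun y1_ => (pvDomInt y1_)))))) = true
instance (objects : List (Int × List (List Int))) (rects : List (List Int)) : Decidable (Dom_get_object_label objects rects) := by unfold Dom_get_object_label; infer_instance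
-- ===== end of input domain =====

-- B replaces A's per-rect scan over every object's list by a reverse index rect→key,
-- built once over the reversed objects with overwriting inserts, then one lookup per rect.

-- ===== PORT A =====
-- inner 'for k, v in objects.items(): if rect in v: labels.append(k); break'
def pvFirstKeyA (objects : List (Int × List (List Int))) (rect : List Int) : Option Int :=
  match objects with
  | [] => none
  | (k, v) :: rest => if rect ∈ v then some k else pvFirstKeyA rest rect

def get_object_label (objects : List (Int × List (List Int))) (rects : List (List Int)) : List Int :=
  rects.foldl (fun labels rect =>
    match pvFirstKeyA objects rect with
    | some k => labels ++ [k]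
    | none => labels) []

-- ===== PORT B =====
-- 'for k, v in reversed(list(objects.items())): for rect in v: index[tuple(rect)] = k'
def pvBuildIndexB (objects : List (Int × List (List Int))) : PySem.Dict (List Int) Int :=
  objects.reverse.foldl (fun d kv => kv.2.foldl (fun d rect => d.insert rect kv.1) d)
    PySem.Dict.empty

-- '[index[t] for t in (tuple(r) for r in rects) if t in index]'
def get_object_label_alt (objects : List (Int × List (List Int))) (rects : List (List Int)) : List Int :=
  let index := pvBuildIndexB objects
  rects.filterMap (fun rect => index.get? rect)

-- ===== PRECONDITION & SPEC =====
def Spec_get_object_label (objects : List (Int × List (List Int))) (rects : List (List Int)) (out : List Int) : Prop := out = get_object_label_alt objects rects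
instance (objects : List (Int × List (List Int))) (rects : List (List Int)) (out : List Int) : Decidable (Spec_get_object_label objects rects out) := by unfold Spec_get_object_label; infer_instance

-- ===== CLAIM =====
def Claim_equal_get_object_label : Prop := ∀ (objects : List (Int × List (List Int))) (rects : List (List Int)), Dom_get_object_label objects rects → Spec_get_object_label objects rects (get_object_label objects rects)

-- ===== LEMMAS AND PROOFS =====

-- one object's inner loop with overwriting inserts, all bound to the same key k
lemma pvInnerB_get? (k : Int) (vs : List (List Int)) (d : PySem.Dict (List Int) Int) (r : List Int) :
    (vs.foldl (fun d rect => d.insert rect k) d).get? r =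
      if r ∈ vs then some k else d.get? r := by
  induction vs generalizing d with
  | nil => simp
  | cons v rest ih =>
    simp only [List.foldl_cons, ih, PySem.Dict.get?_insert, List.mem_cons]
    by_cases h1 : r ∈ rest <;> by_cases h2 : r = v <;> simp [h1, h2]

-- folding the reversed objects = foldr over objects; the head is inserted LAST and wins,
-- which is exactly A's first-match rule
lemma pvBuildB_get? (objects : List (Int × List (List Int))) (r : List Int) :
    (pvBuildIndexB objects).get? r = pvFirstKeyA objects r := by
  unfold pvBuildIndexB
  rw [List.foldl_reverse]
  induction objects with
  | nil => simp [pvFirstKeyA]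
  | cons kv rest ih =>
    obtain ⟨k, vs⟩ := kv
    simp only [List.foldr_cons, pvInnerB_get?, pvFirstKeyA, ih]

-- A's foldl-append accumulator is the filterMap of the same per-rect lookup
lemma pvFoldlA_filterMap (f : List Int → Option Int) (rects : List (List Int)) (acc : List Int) :
    rects.foldl (fun labels rect =>
      match f rect with
      | some k => labels ++ [k]
      | none => labels) acc = acc ++ rects.filterMap f := by
  induction rects generalizing acc with
  | nil => simp
  | cons r rest ih =>
    simp only [List.foldl_cons, List.filterMap_cons]
    cases h : f r <;> simp [ih]

-- ===== VERDICT =====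
theorem get_object_label_spec : Claim_equal_get_object_label := by
  intro objects rects _
  unfold Spec_get_object_label get_object_label get_object_label_alt
  rw [pvFoldlA_filterMap]
  simp only [List.nil_append]
  congr 1
  funext r
  exact (pvBuildB_get? objects r).symm
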